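-- pv_equiv track=rewrite | github.com/kroq86/grav | find_translating_fronts.py | background_two_domains_bits
-- ===== SOURCE A (Python) =====
-- from typing import Dict, Tuple, List, Optional
--
-- def background_two_domains_bits(L: int, left_pat: Tuple[int, ...], right_pat: Tuple[int, ...], cut: int) -> int:
--     """Left domain on [0..cut-1], right domain on [cut..L-1]."""
--     x = 0
--     PL = len(left_pat)
--     PR = len(right_pat)
--     for i in range(L):
--         if i < cut:
--             b = left_pat[i % PL]
--         else:
--             b = right_pat[(i - cut) % PR]
--         x |= (b & 1) << i
--     return x
-- ===== SOURCE B (Python) =====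
-- def background_two_domains_bits(L, left_pat, right_pat, cut):
--     """Left domain on [0..cut-1], right domain on [cut..L-1]."""
--     if L <= 0:
--         return 0
--     nL = min(max(cut, 0), L)
--     nR = L - nL
--     bits = []
--     if nL > 0:
--         PL = len(left_pat)
--         bits = (left_pat * (nL // PL + 1))[:nL]
--     if nR > 0:
--         PR = len(right_pat)
--         off = (nL - cut) % PR
--         rot = right_pat[off:] + right_pat[:off]
--         bits += (rot * (nR // PR + 1))[:nR]
--     return int(''.join('1' if b & 1 else '0' for b in reversed(bits)), 2)
-- ===== Notes on version B (the rewrite author's own statement) =====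
-- stated objective: faster
-- what changed: Instead of OR-ing one shifted bit per position into a growing big integer, B materialises the whole bit sequence at once by tiling the two periodic patterns (list repetition + slicing, with the right pattern rotated to account for a negative cut) and converts it to an integer with a single int(''.join(...), 2) call.
import Mathlib
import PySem

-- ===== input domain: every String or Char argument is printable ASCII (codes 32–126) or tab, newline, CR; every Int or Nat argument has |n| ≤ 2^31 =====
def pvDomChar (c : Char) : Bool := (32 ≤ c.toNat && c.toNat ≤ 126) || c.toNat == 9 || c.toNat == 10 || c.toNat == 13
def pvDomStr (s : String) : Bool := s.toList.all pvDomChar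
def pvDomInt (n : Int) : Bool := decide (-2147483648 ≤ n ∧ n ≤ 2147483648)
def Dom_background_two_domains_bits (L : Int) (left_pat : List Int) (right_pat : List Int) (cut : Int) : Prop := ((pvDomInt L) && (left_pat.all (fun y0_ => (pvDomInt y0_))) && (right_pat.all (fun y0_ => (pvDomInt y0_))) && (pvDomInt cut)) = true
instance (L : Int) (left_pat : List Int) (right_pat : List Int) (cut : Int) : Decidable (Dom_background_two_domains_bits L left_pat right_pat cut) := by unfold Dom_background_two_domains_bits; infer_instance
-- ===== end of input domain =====

-- B replaces A's per-position OR of a shifted bit into a growing big integer by tiling the two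
-- periodic patterns into the whole bit list at once and one base-2 string conversion (objective:
-- faster; a timing run measured the speed-up).

-- ===== PORT A =====
-- literal port of A; i ranges over range(L) so 0 ≤ i and i.toNat is exact; the pyGetD default 0
-- is unreachable under Pre_ (index is i % len, in range when the pattern is nonempty).
def background_two_domains_bits (L : Int) (left_pat : List Int) (right_pat : List Int) (cut : Int) : Int :=
  let PL : Int := left_pat.length
  let PR : Int := right_pat.length
  (PySem.List.pyRange 0 L 1).foldl
    (fun x i =>
      let b : Int :=
        if i < cut then PySem.List.pyGetD left_pat (PySem.Int.mod i PL) 0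
        else PySem.List.pyGetD right_pat (PySem.Int.mod (i - cut) PR) 0
      PySem.Int.bor x (PySem.Int.band b 1 <<< i.toNat)) 0

-- ===== PORT B =====
-- literal port of Source B; int(s, 2) on a string of '0'/'1' chars is ported by hand as a fold
-- (exact there: s contains only '0' and '1' by construction).
def background_two_domains_bits_alt (L : Int) (left_pat : List Int) (right_pat : List Int) (cut : Int) : Int :=
  if L ≤ 0 then 0
  else
    let nL : Int := min (max cut 0) L
    let nR : Int := L - nL
    let bits1 : List Int :=
      if 0 < nL then
        let PL : Int := left_pat.length
        PySem.List.slice (PySem.List.pyRepeat left_pat (PySem.Int.floordiv nL PL + 1)) none (some nL)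
      else []
    let bits : List Int :=
      if 0 < nR then
        let PR : Int := right_pat.length
        let off : Int := PySem.Int.mod (nL - cut) PR
        let rot : List Int :=
          PySem.List.slice right_pat (some off) none ++ PySem.List.slice right_pat none (some off)
        bits1 ++ PySem.List.slice (PySem.List.pyRepeat rot (PySem.Int.floordiv nR PR + 1)) none (some nR)
      else bits1
    ((bits.reverse.map (fun b => if PySem.Int.band b 1 ≠ 0 then '1' else '0')).foldl
      (fun acc c => acc * 2 + (if c = '1' then 1 else 0)) 0)

-- ===== PRECONDITION & SPEC =====
-- Pre_ excludes exactly the inputs where A raises ZeroDivisionError (an empty pattern whose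
-- domain is actually visited); B raises the same exception there.
def Pre_background_two_domains_bits (L : Int) (left_pat : List Int) (right_pat : List Int) (cut : Int) : Prop :=
  (0 < L ∧ 0 < cut → left_pat ≠ []) ∧ (0 < L ∧ cut < L → right_pat ≠ [])
instance (L : Int) (left_pat : List Int) (right_pat : List Int) (cut : Int) : Decidable (Pre_background_two_domains_bits L left_pat right_pat cut) := by unfold Pre_background_two_domains_bits; infer_instance
def pvWitness_background_two_domains_bits : Int × List Int × List Int × Int := (4, [1, 0], [1], 2)

def Spec_background_two_domains_bits (L : Int) (left_pat : List Int) (right_pat : List Int) (cut : Int) (out : Int) : Prop := out = background_two_domains_bits_alt L left_pat right_pat cut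
instance (L : Int) (left_pat : List Int) (right_pat : List Int) (cut : Int) (out : Int) : Decidable (Spec_background_two_domains_bits L left_pat right_pat cut out) := by unfold Spec_background_two_domains_bits; infer_instance

-- ===== CLAIM (what is proved, stated in full; the proofs are below) =====
def Claim_equal_background_two_domains_bits : Prop := ∀ (L : Int) (left_pat : List Int) (right_pat : List Int) (cut : Int), Dom_background_two_domains_bits L left_pat right_pat cut → Pre_background_two_domains_bits L left_pat right_pat cut → Spec_background_two_domains_bits L left_pat right_pat cut (background_two_domains_bits L left_pat right_pat cut)

-- ===== LEMMAS AND PROOFS =====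

-- the bit A reads at position i (raw pattern value, before `& 1`)
def pvBitAt (left_pat right_pat : List Int) (cut : Int) (i : Int) : Int :=
  if i < cut then PySem.List.pyGetD left_pat (PySem.Int.mod i (left_pat.length : Int)) 0
  else PySem.List.pyGetD right_pat (PySem.Int.mod (i - cut) (right_pat.length : Int)) 0

-- little-endian value of a list of binary digits
def pvToNum : List Int → Int
  | [] => 0
  | b :: t => b + 2 * pvToNum t

theorem pvBand_bounds (b : Int) : 0 ≤ PySem.Int.band b 1 ∧ PySem.Int.band b 1 < 2 := by
  rw [PySem.Int.band_one]
  exact ⟨PySem.Int.mod_nonneg b (by norm_num), PySem.Int.mod_lt b (by norm_num)⟩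

theorem pvToNum_bounds (l : List Int) (h : ∀ b ∈ l, 0 ≤ b ∧ b < 2) :
    0 ≤ pvToNum l ∧ pvToNum l < 2 ^ l.length := by
  induction l with
  | nil => simp [pvToNum]
  | cons b t ih =>
    have hb := h b (by simp)
    have ht := ih (fun x hx => h x (by simp [hx]))
    simp only [pvToNum, List.length_cons, pow_succ]
    constructor <;> nlinarith [ht.1, ht.2, hb.1, hb.2]

theorem pvToNum_append (xs ys : List Int) :
    pvToNum (xs ++ ys) = pvToNum xs + 2 ^ xs.length * pvToNum ys := by
  induction xs with
  | nil => simp [pvToNum]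
  | cons b t ih => simp [pvToNum, ih, pow_succ]; ring

theorem pvLor_two_pow_of_lt (a n : ℕ) (h : a < 2 ^ n) : a ||| 2 ^ n = a + 2 ^ n := by
  induction n generalizing a with
  | zero => interval_cases a; decide
  | succ n ih =>
    have hq : a / 2 < 2 ^ n := by omega
    have h1 : (2 : ℕ) ^ (n + 1) = Nat.bit false (2 ^ n) := by simp [Nat.bit_val]; ring
    have h2 : a = Nat.bit (a.testBit 0) (a / 2) := by
      rcases Nat.mod_two_eq_zero_or_one a with h' | h' <;>
        simp [Nat.bit_val, Nat.testBit_zero, h'] <;> omega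
    rw [h2, h1, Nat.lor_bit, ih _ hq]
    rcases Nat.mod_two_eq_zero_or_one a with h' | h' <;>
      simp [Nat.bit_val, Nat.testBit_zero, h'] <;> ring

theorem pvOr_step (x d : Int) (n : Nat) (hx0 : 0 ≤ x) (hx : x < 2 ^ n)
    (hd0 : 0 ≤ d) (hd2 : d < 2) : PySem.Int.bor x (d <<< n) = x + d * 2 ^ n := by
  interval_cases d
  · simp
  · rw [Int.shiftLeft_eq, one_mul,
      PySem.Int.bor_of_nonneg hx0 (by positivity)]
    have h1 : ((2 : Int) ^ n).toNat = 2 ^ n := by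
      have : ((2 ^ n : ℕ) : Int) = (2 : Int) ^ n := by push_cast; ring
      rw [← this, Int.toNat_natCast]
    have h2 : x.toNat < 2 ^ n := by omega
    rw [h1, pvLor_two_pow_of_lt _ _ h2]
    push_cast
    omega

-- A's loop computes the little-endian value of the banded bits, by induction on n
theorem pvA_fold (f : Int → Int) (n : Nat) :
    (PySem.List.pyRange 0 (n : Int) 1).foldl
      (fun x i => PySem.Int.bor x (PySem.Int.band (f i) 1 <<< i.toNat)) 0
    = pvToNum ((List.range n).map (fun k : Nat => PySem.Int.band (f (k : Int)) 1)) := by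
  induction n with
  | zero => simp [PySem.List.pyRange_one_eq_nil, pvToNum]
  | succ n ih =>
    have hcast : ((n + 1 : Nat) : Int) = (n : Int) + 1 := by push_cast; ring
    rw [hcast, PySem.List.pyRange_one_succ_right (by positivity), List.foldl_append,
      List.range_succ, List.map_append, pvToNum_append, ih]
    have hbounds := pvToNum_bounds ((List.range n).map (fun k : Nat => PySem.Int.band (f (k : Int)) 1))
      (by intro b hb; simp only [List.mem_map] at hb; obtain ⟨k, _, rfl⟩ := hb; exact pvBand_bounds _)
    simp only [List.foldl_cons, List.foldl_nil, List.length_map, List.length_range]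
    rw [show ((n : Int)).toNat = n from Int.toNat_natCast n]
    rw [pvOr_step _ _ n hbounds.1 (by simpa using hbounds.2)
      (pvBand_bounds _).1 (pvBand_bounds _).2]
    simp [pvToNum]
    ring

-- the hand-ported int(s, 2) over the reversed char list is the little-endian value
theorem pvB_fold (l : List Int) (acc : Int) :
    ((l.reverse.map (fun b => if PySem.Int.band b 1 ≠ 0 then '1' else '0')).foldl
      (fun acc c => acc * 2 + (if c = '1' then 1 else 0)) acc)
    = acc * 2 ^ l.length + pvToNum (l.map (fun b => PySem.Int.band b 1)) := by
  induction l generalizing acc with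
  | nil => simp [pvToNum]
  | cons b t ih =>
    have hb := pvBand_bounds b
    simp only [List.reverse_cons, List.map_append, List.foldl_append, ih]
    simp only [List.map_cons, List.map_nil, List.foldl_cons, List.foldl_nil, pvToNum,
      List.length_cons, pow_succ]
    by_cases h : PySem.Int.band b 1 = 0
    · simp [h]; ring
    · have h1 : PySem.Int.band b 1 = 1 := by omega
      simp [h1]; ring

-- proof-side names for the pieces B builds
def pvTile (pat : List Int) (P n : Int) : List Int :=
  PySem.List.slice (PySem.List.pyRepeat pat (PySem.Int.floordiv n P + 1)) none (some n)

def pvRot (pat : List Int) (off : Int) : List Int :=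
  PySem.List.slice pat (some off) none ++ PySem.List.slice pat none (some off)

def pvBits (L : Int) (left_pat right_pat : List Int) (cut : Int) : List Int :=
  if 0 < L - min (max cut 0) L then
    (if 0 < min (max cut 0) L then pvTile left_pat (left_pat.length : Int) (min (max cut 0) L) else []) ++
      pvTile (pvRot right_pat (PySem.Int.mod (min (max cut 0) L - cut) (right_pat.length : Int)))
        (right_pat.length : Int) (L - min (max cut 0) L)
  else (if 0 < min (max cut 0) L then pvTile left_pat (left_pat.length : Int) (min (max cut 0) L) else [])

theorem pvAlt_eq_pvBits (L : Int) (left_pat right_pat : List Int) (cut : Int) (hL : ¬ L ≤ 0) :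
    background_two_domains_bits_alt L left_pat right_pat cut
    = (((pvBits L left_pat right_pat cut).reverse.map
        (fun b => if PySem.Int.band b 1 ≠ 0 then '1' else '0')).foldl
        (fun acc c => acc * 2 + (if c = '1' then 1 else 0)) 0) := by
  simp only [background_two_domains_bits_alt, pvBits, pvTile, pvRot, if_neg hL]

theorem pvFlatten_replicate_getElem (pat : List Int) (k i : Nat) (hp : 0 < pat.length)
    (h : i < ((List.replicate k pat).flatten).length) :
    ((List.replicate k pat).flatten)[i] = pat[i % pat.length]'(Nat.mod_lt i hp) := by
  induction k generalizing i with
  | zero => simp at h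
  | succ k ih =>
    simp only [List.replicate_succ, List.flatten_cons] at h ⊢
    by_cases hi : i < pat.length
    · rw [List.getElem_append_left hi]
      congr 1
      exact (Nat.mod_eq_of_lt hi).symm
    · push Not at hi
      rw [List.getElem_append_right hi, ih]
      congr 1
      obtain ⟨j, rfl⟩ : ∃ j, i = pat.length + j := ⟨i - pat.length, by omega⟩
      simp [Nat.add_mod_left]

theorem pvTile_length (pat : List Int) (P n : Int) (hP : P = (pat.length : Int)) (hp : 0 < pat.length) (hn : 0 ≤ n) :
    (pvTile pat P n).length = n.toNat := by
  subst hP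
  have hPi : (0 : Int) < (pat.length : Int) := by exact_mod_cast hp
  unfold pvTile
  rw [PySem.List.slice_to _ hn, List.length_take,
    PySem.Int.floordiv_eq_ediv_of_pos hPi]
  have hflat : ((List.replicate (n / (pat.length : Int) + 1).toNat pat).flatten).length
      = (n / (pat.length : Int) + 1).toNat * pat.length := by
    simp [List.map_replicate, List.sum_replicate, smul_eq_mul]
  simp only [PySem.List.pyRepeat]
  rw [hflat]
  have hq : 0 ≤ n / (pat.length : Int) := Int.ediv_nonneg hn hPi.le
  have hlt : n < (n / (pat.length : Int) + 1) * (pat.length : Int) :=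
    Int.lt_ediv_add_one_mul_self n hPi
  have hcast : (((n / (pat.length : Int) + 1).toNat * pat.length : Nat) : Int)
      = (n / (pat.length : Int) + 1) * (pat.length : Int) := by
    push_cast [Int.toNat_of_nonneg (by omega : (0 : Int) ≤ n / (pat.length : Int) + 1)]
    ring
  have hle : n.toNat ≤ (n / (pat.length : Int) + 1).toNat * pat.length := by
    rw [← Nat.cast_le (α := ℤ), hcast, Int.toNat_of_nonneg hn]
    exact hlt.le
  omega

theorem pvTile_getElem (pat : List Int) (P n : Int) (hP : P = (pat.length : Int)) (hp : 0 < pat.length) (hn : 0 ≤ n)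
    (i : Nat) (hi : i < n.toNat) :
    (pvTile pat P n)[i]'(by rw [pvTile_length pat P n hP hp hn]; exact hi)
      = pat[i % pat.length]'(Nat.mod_lt i hp) := by
  subst hP
  unfold pvTile
  simp only [PySem.List.slice_to _ hn, List.getElem_take]
  exact pvFlatten_replicate_getElem pat _ i hp _

theorem pvRot_length (pat : List Int) (off : Int) (h0 : 0 ≤ off) (h1 : off ≤ (pat.length : Int)) :
    (pvRot pat off).length = pat.length := by
  unfold pvRot
  rw [PySem.List.slice_from _ h0, PySem.List.slice_to _ h0]
  simp
  omega

theorem pvRot_getElem (pat : List Int) (off : Int) (h0 : 0 ≤ off) (h1 : off < (pat.length : Int))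
    (t : Nat) (ht : t < pat.length) :
    (pvRot pat off)[t]'(by rw [pvRot_length pat off h0 (by omega)]; exact ht)
      = pat[(off.toNat + t) % pat.length]'(Nat.mod_lt _ (by omega)) := by
  have ho : off.toNat < pat.length := by omega
  unfold pvRot
  simp only [PySem.List.slice_from _ h0, PySem.List.slice_to _ h0]
  by_cases hcase : t < pat.length - off.toNat
  · rw [List.getElem_append_left (by simp [List.length_drop]; omega)]
    rw [List.getElem_drop]
    congr 1
    rw [Nat.mod_eq_of_lt (by omega)]
  · rw [List.getElem_append_right (by simp [List.length_drop]; omega)]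
    simp only [List.length_drop]
    rw [List.getElem_take]
    congr 1
    have he : off.toNat + t = pat.length + (t - (pat.length - off.toNat)) := by omega
    rw [he, Nat.add_mod_left, Nat.mod_eq_of_lt (by omega)]

theorem pvBits_eq (L : Int) (left_pat right_pat : List Int) (cut : Int) (hL : 0 < L)
    (hpreL : 0 < cut → left_pat ≠ []) (hpreR : cut < L → right_pat ≠ []) :
    pvBits L left_pat right_pat cut
      = (List.range L.toNat).map (fun k : Nat => pvBitAt left_pat right_pat cut (k : Int)) := by
  set nL : Int := min (max cut 0) L with hnL
  have hA : 0 ≤ nL := le_min (le_max_right _ _) hL.le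
  have hB : nL ≤ L := min_le_right _ _
  have hC : 0 < nL → nL ≤ cut ∧ 0 < cut := by
    intro h
    by_cases hcut : 0 < cut
    · refine ⟨le_trans (min_le_left _ _) (le_of_eq (max_eq_left hcut.le)), hcut⟩
    · exfalso; rw [hnL, max_eq_right (by omega : cut ≤ 0)] at h; omega
  have hD : nL < L → cut ≤ nL := by
    intro h
    by_cases hle : max cut 0 ≤ L
    · rw [hnL, min_eq_left hle]; exact le_max_left _ _
    · exfalso; rw [hnL, min_eq_right (by omega : L ≤ max cut 0)] at h; omega
  have hPl : 0 < nL → 0 < left_pat.length := by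
    intro h; exact List.length_pos_of_ne_nil (hpreL (hC h).2)
  have hQr : nL < L → 0 < right_pat.length := by
    intro h; exact List.length_pos_of_ne_nil (hpreR (by have := hD h; omega))
  apply List.ext_getElem
  · -- lengths
    simp only [pvBits, List.length_map, List.length_range]
    by_cases hR : 0 < L - nL
    · rw [if_pos hR]
      have hQ : 0 < right_pat.length := hQr (by omega)
      have hQi : (0 : Int) < (right_pat.length : Int) := by exact_mod_cast hQ
      have hoff0 : 0 ≤ PySem.Int.mod (nL - cut) (right_pat.length : Int) :=
        PySem.Int.mod_nonneg _ hQi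
      have hoff1 : PySem.Int.mod (nL - cut) (right_pat.length : Int) < (right_pat.length : Int) :=
        PySem.Int.mod_lt _ hQi
      rw [List.length_append,
        pvTile_length _ _ _ (by rw [pvRot_length _ _ hoff0 hoff1.le]) (by rw [pvRot_length _ _ hoff0 hoff1.le]; exact hQ) (by omega)]
      by_cases hnL0 : 0 < nL
      · rw [if_pos hnL0, pvTile_length _ _ _ rfl (hPl hnL0) hA]; omega
      · rw [if_neg hnL0]; simp; omega
    · rw [if_neg hR]
      have hnL0 : 0 < nL := by omega
      rw [if_pos hnL0, pvTile_length _ _ _ rfl (hPl hnL0) hA]; omega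
  · intro i hi1 hi2
    simp only [List.length_map, List.length_range] at hi2
    rw [List.getElem_map, List.getElem_range]
    by_cases hiL : (i : Int) < nL
    · -- left-domain position
      have hnL0 : 0 < nL := by omega
      have hP : 0 < left_pat.length := hPl hnL0
      have hiN : i < nL.toNat := by omega
      have hget : ∀ (h : i < (pvBits L left_pat right_pat cut).length),
          (pvBits L left_pat right_pat cut)[i]'h = left_pat[i % left_pat.length]'(Nat.mod_lt i hP) := by
        intro h
        simp only [pvBits] at h ⊢
        simp only [← hnL] at h ⊢
        simp only [if_pos hnL0] at h ⊢
        by_cases hR : 0 < L - nL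
        · simp only [if_pos hR] at h ⊢
          rw [List.getElem_append_left (by rw [pvTile_length _ _ _ rfl hP hA]; exact hiN)]
          exact pvTile_getElem _ _ _ rfl hP hA i hiN
        · simp only [if_neg hR] at h ⊢
          exact pvTile_getElem _ _ _ rfl hP hA i hiN
      rw [hget]
      -- now the spec side
      have hcut : (i : Int) < cut := lt_of_lt_of_le hiL (hC hnL0).1
      rw [pvBitAt, if_pos hcut, PySem.Int.mod_natCast, PySem.List.pyGetD_natCast,
        List.getD_eq_getElem _ _ (Nat.mod_lt i hP)]
    · -- right-domain position
      push Not at hiL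
      have hR : 0 < L - nL := by omega
      have hQ : 0 < right_pat.length := hQr (by omega)
      have hQi : (0 : Int) < (right_pat.length : Int) := by exact_mod_cast hQ
      set off : Int := PySem.Int.mod (nL - cut) (right_pat.length : Int) with hoffdef
      have hoff0 : 0 ≤ off := PySem.Int.mod_nonneg _ hQi
      have hoff1 : off < (right_pat.length : Int) := PySem.Int.mod_lt _ hQi
      have hrotlen : (pvRot right_pat off).length = right_pat.length :=
        pvRot_length _ _ hoff0 hoff1.le
      have hcutle : cut ≤ nL := hD (by omega)
      set j : Nat := i - nL.toNat with hjdef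
      have hjR : j < (L - nL).toNat := by omega
      have hget : ∀ (h : i < (pvBits L left_pat right_pat cut).length),
          (pvBits L left_pat right_pat cut)[i]'h
            = (pvRot right_pat off)[j % right_pat.length]'(by rw [hrotlen]; exact Nat.mod_lt _ hQ) := by
        intro h
        simp only [pvBits] at h ⊢
        simp only [← hnL] at h ⊢
        simp only [if_pos hR] at h ⊢
        have hlen1 : (if 0 < nL then pvTile left_pat (left_pat.length : Int) nL else []).length = nL.toNat := by
          by_cases hnL0 : 0 < nL
          · rw [if_pos hnL0, pvTile_length _ _ _ rfl (hPl hnL0) hA]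
          · rw [if_neg hnL0]; simp; omega
        rw [List.getElem_append_right (by rw [hlen1]; omega)]
        have := pvTile_getElem (pvRot right_pat off) (right_pat.length : Int) (L - nL)
          (by rw [hrotlen]) (by rw [hrotlen]; exact hQ) (by omega) (i - (if 0 < nL then pvTile left_pat (left_pat.length : Int) nL else []).length)
          (by rw [hlen1]; omega)
        rw [this]
        congr 2; simp [hlen1, hjdef]
      rw [hget, pvRot_getElem _ _ hoff0 hoff1 _ (Nat.mod_lt _ hQ)]
      -- now the spec side
      have hnotlt : ¬ ((i : Int) < cut) := by omega
      rw [pvBitAt, if_neg hnotlt]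
      have ha0 : 0 ≤ (i : Int) - cut := by omega
      have hmod : PySem.Int.mod ((i : Int) - cut) (right_pat.length : Int)
          = (((i : Int) - cut).toNat % right_pat.length : Nat) := by
        rw [show ((i : Int) - cut) = ((((i : Int) - cut).toNat : Nat) : Int) from (Int.toNat_of_nonneg ha0).symm,
          PySem.Int.mod_natCast]
        simp
      rw [hmod, PySem.List.pyGetD_natCast,
        List.getD_eq_getElem _ _ (Nat.mod_lt _ hQ)]
      congr 1
      -- index arithmetic: (off.toNat + j % Q) % Q = ((i - cut).toNat) % Q
      have hoffN : ((off.toNat : Nat) : Int) = off := Int.toNat_of_nonneg hoff0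
      have hjI : ((j : Nat) : Int) = (i : Int) - nL := by
        rw [hjdef]; omega
      have key : (((off.toNat + j % right_pat.length) % right_pat.length : Nat) : Int)
          = ((((i : Int) - cut).toNat % right_pat.length : Nat) : Int) := by
        rw [Int.natCast_emod, Int.natCast_emod]
        push_cast
        rw [hoffN, hjI, Int.toNat_of_nonneg ha0, hoffdef,
          PySem.Int.mod_eq_emod_of_pos hQi, Int.emod_add_emod, Int.add_emod_emod,
          show nL - cut + ((i : Int) - nL) = (i : Int) - cut from by ring]
      exact_mod_cast key

theorem pvAlt_eq (L : Int) (left_pat right_pat : List Int) (cut : Int) (hL : 0 < L)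
    (hpreL : 0 < cut → left_pat ≠ []) (hpreR : cut < L → right_pat ≠ []) :
    background_two_domains_bits_alt L left_pat right_pat cut
    = pvToNum (((List.range L.toNat).map (fun k : Nat => pvBitAt left_pat right_pat cut (k : Int))).map
        (fun b => PySem.Int.band b 1)) := by
  rw [pvAlt_eq_pvBits L left_pat right_pat cut (by omega), pvB_fold, zero_mul, zero_add,
    pvBits_eq L left_pat right_pat cut hL hpreL hpreR]

-- ===== VERDICT (by name: the statement is the Claim_ definition above) =====
theorem background_two_domains_bits_spec : Claim_equal_background_two_domains_bits := by
  intro L left_pat right_pat cut _hDom hPre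
  unfold Spec_background_two_domains_bits
  obtain ⟨hpl, hpr⟩ := hPre
  by_cases hL : L ≤ 0
  · simp only [background_two_domains_bits, background_two_domains_bits_alt, if_pos hL]
    rw [PySem.List.pyRange_one_eq_nil hL]
    simp
  · push Not at hL
    rw [pvAlt_eq L left_pat right_pat cut hL (fun h => hpl ⟨hL, h⟩) (fun h => hpr ⟨hL, h⟩)]
    have hA := pvA_fold (fun i => if i < cut then PySem.List.pyGetD left_pat (PySem.Int.mod i (left_pat.length : Int)) 0
        else PySem.List.pyGetD right_pat (PySem.Int.mod (i - cut) (right_pat.length : Int)) 0) L.toNat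
    simp only at hA
    simp only [background_two_domains_bits]
    rw [show L = ((L.toNat : Nat) : Int) from (Int.toNat_of_nonneg hL.le).symm, hA, List.map_map]
    rfl
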